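-- pv_equiv track=rewrite | github.com/nanashiwang/chat2api | api/models.py | resolve_request_model
-- ===== SOURCE A (Python) =====
-- MODEL_REQUEST_RULES = (
--     ("o3-mini-high", "o3-mini-high"),
--     ("o3-mini-medium", "o3-mini-medium"),
--     ("o3-mini-low", "o3-mini-low"),
--     ("o3-mini", "o3-mini"),
--     ("o3", "o3"),
--     ("o1-preview", "o1-preview"),
--     ("o1-pro", "o1-pro"),
--     ("o1-mini", "o1-mini"),
--     ("o1", "o1"),
--     ("gpt-4.5o", "gpt-4.5o"),
--     ("gpt-4o-canmore", "gpt-4o-canmore"),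
--     ("gpt-4o-mini", "gpt-4o-mini"),
--     ("gpt-4o", "gpt-4o"),
--     ("gpt-4-mobile", "gpt-4-mobile"),
--     ("gpt-4", "gpt-4"),
--     ("gpt-3.5", "text-davinci-002-render-sha"),
--     ("auto", "auto"),
-- )
--
-- def match_model_family(origin_model, alias):
--     return origin_model == alias or origin_model.startswith(f"{alias}-")
--
-- def resolve_request_model(origin_model):
--     origin_model = (origin_model or "gpt-3.5-turbo-0125").strip()
--     base_model = origin_model
--     gizmo_id = None
--
--     if "-gizmo-g-" in origin_model:
--         base_model, _, gizmo_suffix = origin_model.partition("-gizmo-")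
--         gizmo_id = gizmo_suffix
--     elif origin_model.startswith("g-"):
--         gizmo_id = origin_model
--         base_model = "gpt-4o"
--
--     for alias, target in MODEL_REQUEST_RULES:
--         if match_model_family(base_model, alias):
--             return target, gizmo_id, False
--
--     return base_model, gizmo_id, True
-- ===== SOURCE B (Python) =====
-- FAMILIES = (
--     "o3-mini-high",
--     "o3-mini-medium",
--     "o3-mini-low",
--     "o3-mini",
--     "o3",
--     "o1-preview",
--     "o1-pro",
--     "o1-mini",
--     "o1",
--     "gpt-4.5o",
--     "gpt-4o-canmore",
--     "gpt-4o-mini",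
--     "gpt-4o",
--     "gpt-4-mobile",
--     "gpt-4",
--     "auto",
-- )
--
-- RULES = {k: k for k in FAMILIES}
-- RULES["gpt-3.5"] = "text-davinci-002-render-sha"
--
--
-- def _gizmo_split(om):
--     if "-gizmo-g-" in om:
--         i = om.find("-gizmo-")
--         return om[:i], om[i + 7:]
--     if om.startswith("g-"):
--         return "gpt-4o", om
--     return om, None
--
--
-- def resolve_request_model(origin_model):
--     om = (origin_model or "gpt-3.5-turbo-0125").strip()
--     base_model, gizmo_id = _gizmo_split(om)
--     n = len(base_model)
--     # longest-to-shortest dash-boundary prefixes, looked up in the dict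
--     for cut in range(n, -1, -1):
--         if cut == n or base_model[cut] == "-":
--             hit = RULES.get(base_model[:cut])
--             if hit is not None:
--                 return hit, gizmo_id, False
--     return base_model, gizmo_id, True
-- ===== Notes on version B (the rewrite author's own statement) =====
-- stated objective: idiomatic
-- what changed: A scans the 17-entry rule tuple linearly, testing each alias as a dash-boundary prefix of the base model; B precomputes a dict keyed by family name and walks the cut positions of the base model from longest to shortest, returning the dict hit at the first dash-boundary prefix that is a key.
import Mathlib
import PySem

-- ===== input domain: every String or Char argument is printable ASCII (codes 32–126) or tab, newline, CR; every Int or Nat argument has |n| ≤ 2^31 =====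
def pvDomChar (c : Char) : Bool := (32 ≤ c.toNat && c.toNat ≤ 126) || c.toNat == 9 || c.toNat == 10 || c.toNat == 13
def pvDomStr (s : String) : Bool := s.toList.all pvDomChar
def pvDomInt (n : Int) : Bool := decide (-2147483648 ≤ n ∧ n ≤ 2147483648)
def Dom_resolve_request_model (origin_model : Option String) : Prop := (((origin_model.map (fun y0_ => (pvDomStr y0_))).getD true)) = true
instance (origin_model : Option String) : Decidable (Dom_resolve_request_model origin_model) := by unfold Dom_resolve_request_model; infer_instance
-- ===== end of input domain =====

-- B replaces A's linear scan of the 17-entry rule tuple by a dict of the rules plus a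
-- countdown over the dash-boundary cut points of the base model name (longest prefix first);
-- same return value everywhere.

-- ===== PORT A =====
def MODEL_REQUEST_RULES : List (String × String) := [
  ("o3-mini-high", "o3-mini-high"),
  ("o3-mini-medium", "o3-mini-medium"),
  ("o3-mini-low", "o3-mini-low"),
  ("o3-mini", "o3-mini"),
  ("o3", "o3"),
  ("o1-preview", "o1-preview"),
  ("o1-pro", "o1-pro"),
  ("o1-mini", "o1-mini"),
  ("o1", "o1"),
  ("gpt-4.5o", "gpt-4.5o"),
  ("gpt-4o-canmore", "gpt-4o-canmore"),
  ("gpt-4o-mini", "gpt-4o-mini"),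
  ("gpt-4o", "gpt-4o"),
  ("gpt-4-mobile", "gpt-4-mobile"),
  ("gpt-4", "gpt-4"),
  ("gpt-3.5", "text-davinci-002-render-sha"),
  ("auto", "auto")]

def match_model_family (origin_model alias_ : String) : Bool :=
  origin_model == alias_ || PySem.Str.startswith origin_model (alias_ ++ "-")

-- hand port of str.partition(sep) for nonempty sep: split at the FIRST occurrence,
-- (s, '', '') when sep does not occur — exact for the nonempty literal separator used below
def pyPartition (s sep : String) : String × String × String :=
  let i := PySem.Str.find s sep
  if i < 0 then (s, "", "")
  else (String.ofList (s.toList.take i.toNat), sep,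
        String.ofList (s.toList.drop (i.toNat + sep.toList.length)))

-- 'origin_model or "gpt-3.5-turbo-0125"'
def defaultModel : Option String → String
  | none => "gpt-3.5-turbo-0125"
  | some s => if s == "" then "gpt-3.5-turbo-0125" else s

-- A's gizmo preprocessing of the stripped model name
def preprocess (om : String) : String × Option String :=
  if PySem.Str.isIn "-gizmo-g-" om then
    let p := pyPartition om "-gizmo-"
    (p.1, some p.2.2)
  else if PySem.Str.startswith om "g-" then ("gpt-4o", some om)
  else (om, none)

-- the 'for alias_, target in MODEL_REQUEST_RULES' loop (returns the first matching target)
def ruleScan : List (String × String) → String → Option String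
  | [], _ => none
  | (alias_, target) :: rest, base =>
    if match_model_family base alias_ then some target else ruleScan rest base

def resolve_request_model (origin_model : Option String) : String × Option String × Bool :=
  match ruleScan MODEL_REQUEST_RULES (preprocess (PySem.Str.strip (defaultModel origin_model))).1 with
  | some target => (target, (preprocess (PySem.Str.strip (defaultModel origin_model))).2, false)
  | none => ((preprocess (PySem.Str.strip (defaultModel origin_model))).1,
             (preprocess (PySem.Str.strip (defaultModel origin_model))).2, true)

-- ===== PORT B =====
def FAMILIES : List String := [
  "o3-mini-high", "o3-mini-medium", "o3-mini-low", "o3-mini", "o3",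
  "o1-preview", "o1-pro", "o1-mini", "o1",
  "gpt-4.5o", "gpt-4o-canmore", "gpt-4o-mini", "gpt-4o", "gpt-4-mobile", "gpt-4",
  "auto"]

-- RULES = {k: k for k in FAMILIES}; RULES["gpt-3.5"] = "text-davinci-002-render-sha"
def RULES : PySem.Dict String String :=
  (PySem.Dict.ofList (FAMILIES.map (fun k => (k, k)))).insert
    "gpt-3.5" "text-davinci-002-render-sha"

-- _gizmo_split(om): om[:i], om[i+7:] around the first "-gizmo-" (i = om.find("-gizmo-") ≥ 0
-- whenever "-gizmo-g-" occurs in om, so the slices are plain take/drop)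
def gizmoSplit (om : String) : String × Option String :=
  if PySem.Str.isIn "-gizmo-g-" om then
    let i := (PySem.Str.find om "-gizmo-").toNat
    (String.ofList (om.toList.take i), some (String.ofList (om.toList.drop (i + 7))))
  else if PySem.Str.startswith om "g-" then ("gpt-4o", some om)
  else (om, none)

-- body of B's 'for cut in range(n, -1, -1)' loop at one cut point
def hitAt (cs : List Char) (cut : Nat) : Option String :=
  if cut = cs.length ∨ cs[cut]? = some '-' then RULES.get? (String.ofList (cs.take cut))
  else none

-- the countdown loop itself: try cut, then cut-1, …, then 0
def bScan (cs : List Char) : Nat → Option String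
  | 0 => hitAt cs 0
  | cut + 1 =>
    match hitAt cs (cut + 1) with
    | some t => some t
    | none => bScan cs cut

-- B's 'origin_model or "gpt-3.5-turbo-0125"' (empty string is falsy)
def defaultModelB : Option String → String
  | none => "gpt-3.5-turbo-0125"
  | some s => if s.isEmpty then "gpt-3.5-turbo-0125" else s

def resolve_request_model_alt (origin_model : Option String) : String × Option String × Bool :=
  match bScan (gizmoSplit (PySem.Str.strip (defaultModelB origin_model))).1.toList
          (gizmoSplit (PySem.Str.strip (defaultModelB origin_model))).1.toList.length with
  | some target => (target, (gizmoSplit (PySem.Str.strip (defaultModelB origin_model))).2, false)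
  | none => ((gizmoSplit (PySem.Str.strip (defaultModelB origin_model))).1,
             (gizmoSplit (PySem.Str.strip (defaultModelB origin_model))).2, true)

-- ===== PRECONDITION & SPEC =====
def Spec_resolve_request_model (origin_model : Option String) (out : String × Option String × Bool) : Prop := out = resolve_request_model_alt origin_model
instance (origin_model : Option String) (out : String × Option String × Bool) : Decidable (Spec_resolve_request_model origin_model out) := by unfold Spec_resolve_request_model; infer_instance

-- ===== CLAIM (what is proved, stated in full; the proofs are below) =====
def Claim_equal_resolve_request_model : Prop := ∀ (origin_model : Option String), Dom_resolve_request_model origin_model → Spec_resolve_request_model origin_model (resolve_request_model origin_model)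

-- ===== LEMMAS AND PROOFS =====

-- 'alias_ matches base' on the character-list level
def matchL (cs a : List Char) : Prop := cs = a ∨ a ++ ['-'] <+: cs

-- the candidate prefixes B's countdown tries, longest first
def Cands (cs : List Char) : List (List Char) :=
  (((List.range (cs.length + 1)).reverse.filter
      (fun k => decide (k = cs.length ∨ cs[k]? = some '-'))).map (cs.take ·))

theorem mm_iff (base k : String) :
    match_model_family base k = true ↔ matchL base.toList k.toList := by
  simp [match_model_family, matchL, String.ext_iff, PySem.Chars.startswith_iff]

theorem ruleScan_eq_find? (rules : List (String × String)) (base : String) :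
    ruleScan rules base
      = (rules.find? (fun p => match_model_family base p.1)).map Prod.snd := by
  induction rules with
  | nil => rfl
  | cons p rest ih =>
    obtain ⟨a, t⟩ := p
    simp only [ruleScan, List.find?_cons]
    by_cases h : match_model_family base a = true
    · simp [h]
    · simp only [h, Bool.false_eq_true, ite_false]
      simpa [h] using ih

theorem bScan_eq_find? (cs : List Char) (cut : Nat) :
    bScan cs cut
      = (((((List.range (cut + 1)).reverse.filter
              (fun k => decide (k = cs.length ∨ cs[k]? = some '-'))).map (cs.take ·)).find?
            (fun c => (RULES.get? (String.ofList c)).isSome)).bind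
          (fun c => RULES.get? (String.ofList c))) := by
  induction cut with
  | zero =>
    have h0 : (List.range (0 + 1)).reverse = [0] := by simp
    rw [h0]
    by_cases h : 0 = cs.length ∨ cs[0]? = some '-'
    · cases hg : RULES.get? "" with
      | some t => simp [bScan, hitAt, h, hg]
      | none => simp [bScan, hitAt, h, hg]
    · simp [bScan, hitAt, h]
  | succ c ih =>
    have hr : (List.range (c + 1 + 1)).reverse = (c + 1) :: (List.range (c + 1)).reverse := by
      rw [List.range_succ, List.reverse_append]; rfl
    rw [hr]
    by_cases h : c + 1 = cs.length ∨ cs[c + 1]? = some '-'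
    · cases hg : RULES.get? (String.ofList (cs.take (c + 1))) with
      | some t => simp [bScan, hitAt, h, hg]
      | none => simp [bScan, hitAt, h, hg, ih]
    · simp [bScan, hitAt, h, ih]

theorem Cands_mem (cs : List Char) (c : List Char) :
    c ∈ Cands cs ↔ matchL cs c := by
  simp only [Cands, List.mem_map, List.mem_filter, List.mem_reverse, List.mem_range,
    decide_eq_true_eq]
  constructor
  · rintro ⟨k, ⟨hk, hP⟩, rfl⟩
    rcases hP with rfl | hc
    · exact Or.inl (by simp)
    · right
      rw [List.getElem?_eq_some_iff] at hc
      obtain ⟨hlt, hget⟩ := hc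
      refine ⟨cs.drop (k + 1), ?_⟩
      have := List.take_append_drop k cs
      rw [List.drop_eq_getElem_cons hlt] at this
      simpa [hget] using this
  · rintro (rfl | ⟨t, ht⟩)
    · exact ⟨cs.length, ⟨by omega, Or.inl rfl⟩, by simp⟩
    · subst ht
      have hlen : c.length + 1 ≤ (c ++ ['-'] ++ t).length := by simp
      refine ⟨c.length, ⟨by omega, Or.inr ?_⟩, ?_⟩
      · rw [List.getElem?_eq_some_iff]
        refine ⟨by omega, ?_⟩
        simp [List.getElem_append_right (le_refl c.length)]
      · rw [List.append_assoc]
        exact List.take_left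

theorem Cands_pairwise (cs : List Char) :
    (Cands cs).Pairwise (fun x y => y.length < x.length) := by
  have h1 : ((List.range (cs.length + 1)).reverse.filter
      (fun k => decide (k = cs.length ∨ cs[k]? = some '-'))).Pairwise (fun a b => b < a) := by
    refine List.Pairwise.sublist List.filter_sublist ?_
    rw [List.pairwise_reverse]
    exact List.pairwise_lt_range
  rw [Cands, List.pairwise_map]
  refine h1.imp_of_mem ?_
  intro a b ha hb hab
  have ha' : a ≤ cs.length := by
    have := List.mem_reverse.mp (List.mem_filter.mp ha).1
    have := List.mem_range.mp this
    omega
  simp only [List.length_take]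
  omega

theorem find_first (l : List (List Char)) (p : List Char → Bool) (a : List Char)
    (h1 : a ∈ l) (h2 : p a = true)
    (h3 : l.Pairwise (fun x y => y.length < x.length))
    (h4 : ∀ c ∈ l, p c = true → c = a ∨ c.length < a.length) :
    l.find? p = some a := by
  induction l with
  | nil => simp at h1
  | cons x rest ih =>
    by_cases hx : p x = true
    · have hxa : x = a := by
        rcases h4 x (List.mem_cons_self ..) hx with h | hlen
        · exact h
        · rcases List.mem_cons.mp h1 with h | h1'
          · exact h.symm
          · have := (List.pairwise_cons.mp h3).1 a h1'
            omega
      rw [List.find?_cons_of_pos hx, hxa]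
    · have hne : x ≠ a := fun h => hx (h ▸ h2)
      rw [List.find?_cons_of_neg (by simpa using hx)]
      exact ih ((List.mem_cons.mp h1).resolve_left (fun h => hne h.symm)) (List.pairwise_cons.mp h3).2
        (fun c hc hpc => h4 c (List.mem_cons_of_mem _ hc) hpc)

theorem match_nest (cs a b : List Char) (ha : matchL cs a) (hb : matchL cs b)
    (hl : a.length ≤ b.length) : a = b ∨ matchL b a := by
  rcases ha with rfl | ha
  · rcases hb with rfl | hb
    · exact Or.inl rfl
    · have := hb.length_le
      simp at this
      omega
  · rcases hb with rfl | hb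
    · exact Or.inr (Or.inr ha)
    · have hab : a ++ ['-'] <+: b ++ ['-'] :=
        List.prefix_of_prefix_length_le ha hb (by simp [hl])
      by_cases he : a.length = b.length
      · left
        have h := List.IsPrefix.eq_of_length hab (by simp [he])
        exact List.append_cancel_right h
      · refine Or.inr (Or.inr ?_)
        have hlen : a.length + 1 ≤ b.length := by omega
        rw [List.prefix_iff_eq_take] at hab ⊢
        rw [List.take_append_of_le_length (by simpa using hlen)] at hab
        simpa using hab

theorem rules_get (p : String × String) (hp : p ∈ MODEL_REQUEST_RULES) :
    RULES.get? p.1 = some p.2 := by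
  fin_cases hp <;> decide

theorem rules_keys_sub (s : String) (hs : s ∈ RULES.keys) :
    s ∈ MODEL_REQUEST_RULES.map Prod.fst := by
  have h : ∀ x ∈ RULES.keys, x ∈ MODEL_REQUEST_RULES.map Prod.fst := by decide
  exact h s hs

theorem rules_pairwise :
    MODEL_REQUEST_RULES.Pairwise (fun x y => match_model_family y.1 x.1 = false) := by decide

theorem get?_isSome_mem (s : String) (h : (RULES.get? s).isSome = true) :
    s ∈ MODEL_REQUEST_RULES.map Prod.fst := by
  rw [← PySem.Dict.contains_eq_isSome_get?, PySem.Dict.contains_iff_mem_keys] at h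
  exact rules_keys_sub s h

theorem scan_eq (base : String) :
    ruleScan MODEL_REQUEST_RULES base = bScan base.toList base.toList.length := by
  rw [ruleScan_eq_find?, bScan_eq_find?]
  have hLC : (((List.range (base.toList.length + 1)).reverse.filter
      (fun k => decide (k = base.toList.length ∨ base.toList[k]? = some '-'))).map
        (base.toList.take ·)) = Cands base.toList := rfl
  rw [hLC]
  cases hA : MODEL_REQUEST_RULES.find? (fun p => match_model_family base p.1) with
  | none =>
    rw [List.find?_eq_none] at hA
    have hB : (Cands base.toList).find? (fun c => (RULES.get? (String.ofList c)).isSome) = none := by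
      rw [List.find?_eq_none]
      intro c hc hp
      have hk := get?_isSome_mem (String.ofList c) (by simpa using hp)
      rw [List.mem_map] at hk
      obtain ⟨q, hq, hq1⟩ := hk
      have hm : matchL base.toList c := (Cands_mem base.toList c).mp hc
      have hmm : match_model_family base q.1 = true := by
        rw [mm_iff]
        rw [show q.1.toList = c from by rw [hq1, String.toList_ofList]]
        exact hm
      exact absurd hmm (by simpa using hA q hq)
    rw [hB]
    rfl
  | some pr =>
    obtain ⟨a, t⟩ := pr
    rw [List.find?_eq_some_iff_append] at hA
    obtain ⟨hpa, l1, l2, hsplit, hl1⟩ := hA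
    have hmem : (a, t) ∈ MODEL_REQUEST_RULES := by rw [hsplit]; simp
    have hget : RULES.get? a = some t := rules_get (a, t) hmem
    have hma : matchL base.toList a.toList := (mm_iff base a).mp (by simpa using hpa)
    have hlong : ∀ s : String, s ∈ MODEL_REQUEST_RULES.map Prod.fst →
        match_model_family base s = true → s = a ∨ s.toList.length < a.toList.length := by
      intro s hs hms
      by_cases hsa : s = a
      · exact Or.inl hsa
      · refine Or.inr ?_
        rw [List.mem_map] at hs
        obtain ⟨q, hq, rfl⟩ := hs
        rw [hsplit, List.mem_append, List.mem_cons] at hq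
        rcases hq with hq | hq | hq
        · exact absurd hms (by simpa using hl1 q hq)
        · exact absurd (congrArg Prod.fst hq) hsa
        · have hP := rules_pairwise
          rw [hsplit] at hP
          have hcons := List.pairwise_cons.mp (List.pairwise_append.mp hP).2.1
          have hfalse : match_model_family q.1 a = false := hcons.1 q hq
          by_contra hge
          rw [not_lt] at hge
          have hnest := match_nest base.toList a.toList q.1.toList hma
            ((mm_iff base q.1).mp hms) (by omega)
          rcases hnest with he | hm2
          · exact hsa (String.ext_iff.mpr he.symm)
          · have : match_model_family q.1 a = true := (mm_iff q.1 a).mpr hm2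
            rw [hfalse] at this
            cases this
    have hfind : (Cands base.toList).find? (fun c => (RULES.get? (String.ofList c)).isSome)
        = some a.toList := by
      apply find_first
      · exact (Cands_mem base.toList a.toList).mpr hma
      · simp [String.ofList_toList, hget]
      · exact Cands_pairwise base.toList
      · intro c hc hp
        have hk := get?_isSome_mem (String.ofList c) (by simpa using hp)
        have hm : matchL base.toList c := (Cands_mem base.toList c).mp hc
        have hmm : match_model_family base (String.ofList c) = true := by
          rw [mm_iff, String.toList_ofList]
          exact hm
        rcases hlong (String.ofList c) hk hmm with he | hlt
        · exact Or.inl (by rw [← he, String.toList_ofList])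
        · exact Or.inr (by rwa [String.toList_ofList] at hlt)
    rw [hfind]
    simp [String.ofList_toList, hget]

theorem core_eq (v : String) : gizmoSplit v = preprocess v := by
  unfold gizmoSplit preprocess pyPartition
  by_cases hin : PySem.Str.isIn "-gizmo-g-" v
  · have hinf : "-gizmo-".toList <:+: v.toList := by
      have h1 : "-gizmo-g-".toList <:+: v.toList := (PySem.Str.isIn_iff_infix _ _).mp hin
      exact List.IsInfix.trans (by decide) h1
    have hpos : ¬ PySem.Str.find v "-gizmo-" < 0 := by
      have := (PySem.Str.find_nonneg_iff v "-gizmo-").mpr hinf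
      omega
    simp only [hin, if_true, if_neg hpos]
    have h7 : "-gizmo-".toList.length = 7 := rfl
    rw [h7]
  · simp only [PySem.Str.isIn_eq] at hin
    rw [show "-gizmo-g-".toList = ['-','g','i','z','m','o','-','g','-'] from rfl] at hin
    simp [hin]

theorem default_eq (origin_model : Option String) :
    defaultModelB origin_model = defaultModel origin_model := by
  cases origin_model with
  | none => rfl
  | some s => by_cases hs : s = "" <;> simp [defaultModel, defaultModelB, hs]

-- ===== VERDICT (by name: the statement is the Claim_ definition above) =====
theorem resolve_request_model_spec : Claim_equal_resolve_request_model := by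
  intro om _
  unfold Spec_resolve_request_model resolve_request_model resolve_request_model_alt
  rw [default_eq om, core_eq, scan_eq]
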